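-- pv_equiv track=rewrite | github.com/ROBERTHGONZALES/actividad5 | ej7.py | contar_errores
-- ===== SOURCE A (Python) =====
-- def contar_errores(archivo_entrada):
--     conteo_errores = {}
--
--
--     for linea in archivo_entrada:
--         error = linea.strip()
--         if error in conteo_errores:
--             conteo_errores[error] += 1
--         else:
--             conteo_errores[error] = 1
--
--     return conteo_errores
-- ===== SOURCE B (Python) =====
-- def contar_errores(archivo_entrada):
--     # Sort the stripped lines, count each run of equal strings in one scan,
--     # then emit the counts keyed in first-appearance order.
--     errores = [linea.strip() for linea in archivo_entrada]
--     cuentas = {}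
--     prev = None
--     run = 0
--     for e in sorted(errores):
--         if e == prev:
--             run += 1
--         else:
--             if prev is not None:
--                 cuentas[prev] = run
--             prev = e
--             run = 1
--     if prev is not None:
--         cuentas[prev] = run
--     return {e: cuentas[e] for e in dict.fromkeys(errores)}
-- ===== Notes on version B (the rewrite author's own statement) =====
-- stated objective: alternative
-- what changed: Replaces A's incremental membership-test/increment dict loop by sort-then-group: strip all lines once, sort them, count each run of equal strings in a single scan, then emit the counts keyed in first-appearance order.
import Mathlib
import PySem

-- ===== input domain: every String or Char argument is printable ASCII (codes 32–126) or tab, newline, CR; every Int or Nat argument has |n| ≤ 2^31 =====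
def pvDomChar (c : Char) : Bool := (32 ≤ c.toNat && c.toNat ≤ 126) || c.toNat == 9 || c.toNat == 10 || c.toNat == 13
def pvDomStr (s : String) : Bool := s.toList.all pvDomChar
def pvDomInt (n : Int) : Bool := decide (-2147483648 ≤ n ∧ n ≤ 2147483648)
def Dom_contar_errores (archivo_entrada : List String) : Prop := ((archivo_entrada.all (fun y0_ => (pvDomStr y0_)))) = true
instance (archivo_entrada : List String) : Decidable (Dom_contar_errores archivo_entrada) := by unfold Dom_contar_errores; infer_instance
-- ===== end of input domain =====

-- B change (objective: alternative): instead of A's membership-test/increment dict loop, B sorts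
-- the stripped lines once, counts each run of equal strings in a single scan, and emits the counts
-- keyed in first-appearance order.

-- ===== PORT A =====
def contar_errores (archivo_entrada : List String) : List (String × Int) :=
  (archivo_entrada.foldl
    (fun conteo_errores linea =>
      let error := PySem.Str.strip linea
      if PySem.Dict.contains conteo_errores error then
        PySem.Dict.insert conteo_errores error (PySem.Dict.getD conteo_errores error 0 + 1)
      else
        PySem.Dict.insert conteo_errores error 1)
    PySem.Dict.empty).items

-- ===== PORT B =====
-- loop body of B's run-counting scan over the sorted list: state = (cuentas, prev, run)
def pasoConteo (acc : PySem.Dict String Int × Option String × Int) (e : String) :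
    PySem.Dict String Int × Option String × Int :=
  if some e == acc.2.1 then (acc.1, acc.2.1, acc.2.2 + 1)
  else
    match acc.2.1 with
    | some p => (PySem.Dict.insert acc.1 p acc.2.2, some e, 1)
    | none => (acc.1, some e, 1)

-- B's trailing 'if prev is not None: cuentas[prev] = run'
def volcar (st : PySem.Dict String Int × Option String × Int) : PySem.Dict String Int :=
  match st.2.1 with
  | some p => PySem.Dict.insert st.1 p st.2.2
  | none => st.1

def contar_errores_alt (archivo_entrada : List String) : List (String × Int) :=
  let errores := archivo_entrada.map PySem.Str.strip
  let cuentas := volcar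
    ((PySem.List.sorted errores (fun x => x) false).foldl pasoConteo (PySem.Dict.empty, none, 0))
  -- {e: cuentas[e] for e in dict.fromkeys(errores)}; every e is a key of cuentas, so
  -- cuentas[e] never raises and (get? …).getD 0 is exact there
  ((PySem.List.dedup errores).foldl
    (fun d e => PySem.Dict.insert d e ((PySem.Dict.get? cuentas e).getD 0))
    PySem.Dict.empty).items

-- ===== PRECONDITION & SPEC =====
def Spec_contar_errores (archivo_entrada : List String) (out : List (String × Int)) : Prop := out = contar_errores_alt archivo_entrada
instance (archivo_entrada : List String) (out : List (String × Int)) : Decidable (Spec_contar_errores archivo_entrada out) := by unfold Spec_contar_errores; infer_instance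

-- ===== CLAIM (what is proved, stated in full; the proofs are below) =====
def Claim_equal_contar_errores : Prop := ∀ (archivo_entrada : List String), Dom_contar_errores archivo_entrada → Spec_contar_errores archivo_entrada (contar_errores archivo_entrada)

-- ===== LEMMAS AND PROOFS =====

-- A's loop body is exactly Counter's step: membership test + overwrite = modify (+1).
theorem step_eq_modify (d : PySem.Dict String Int) (e : String) :
    (if PySem.Dict.contains d e then
        PySem.Dict.insert d e (PySem.Dict.getD d e 0 + 1)
      else PySem.Dict.insert d e 1) = PySem.Dict.modify d e 0 (· + 1) := by
  by_cases h : PySem.Dict.contains d e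
  · obtain ⟨items⟩ := d
    simp [PySem.Dict.contains] at h
    simp [PySem.Dict.insert, PySem.Dict.modify, PySem.Dict.getD, PySem.Dict.get?,
      PySem.Dict.contains, h]
  · obtain ⟨items⟩ := d
    simp [PySem.Dict.contains] at h
    simp [PySem.Dict.insert, PySem.Dict.modify, PySem.Dict.getD, PySem.Dict.get?,
      PySem.Dict.contains, h]
    rw [List.find?_eq_none.mpr (by
      intro p hp
      simp only [beq_iff_eq]
      intro hpe
      exact h p.2 (by cases p; simp_all))]
    rfl

theorem fold_eq_counter (xs : List String) (d : PySem.Dict String Int) :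
    xs.foldl (fun conteo_errores linea =>
      let error := PySem.Str.strip linea
      if PySem.Dict.contains conteo_errores error then
        PySem.Dict.insert conteo_errores error (PySem.Dict.getD conteo_errores error 0 + 1)
      else PySem.Dict.insert conteo_errores error 1) d
    = (xs.map PySem.Str.strip).foldl (fun d x => PySem.Dict.modify d x 0 (· + 1)) d := by
  induction xs generalizing d with
  | nil => rfl
  | cons l t ih =>
    simp only [List.foldl_cons, List.map_cons]
    rw [step_eq_modify d (PySem.Str.strip l)]
    exact ih _

-- inserting a missing key appends the pair
theorem insert_fresh (d : PySem.Dict String Int) (k : String) (v : Int)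
    (h : ¬ PySem.Dict.contains d k) :
    PySem.Dict.insert d k v = PySem.Dict.mk (d.items ++ [(k, v)]) := by
  obtain ⟨items⟩ := d
  simp only [PySem.Dict.contains] at h
  simp [PySem.Dict.insert, h]

-- building a dict by inserting pairwise-distinct fresh keys lists them in order
theorem fold_insert_items (ks : List String) (f : String → Int) (d : PySem.Dict String Int)
    (hn : ks.Nodup) (hf : ∀ k ∈ ks, ¬ PySem.Dict.contains d k) :
    (ks.foldl (fun d e => PySem.Dict.insert d e (f e)) d).items
      = d.items ++ ks.map (fun k => (k, f k)) := by
  induction ks generalizing d with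
  | nil => simp
  | cons k t ih =>
    simp only [List.foldl_cons, List.map_cons]
    rw [insert_fresh d k (f k) (hf k (by simp))]
    rw [ih _ hn.of_cons]
    · simp
    · intro x hx
      have hxk : x ≠ k := fun hh => (List.nodup_cons.mp hn).1 (hh ▸ hx)
      have hxd := hf x (List.mem_cons_of_mem _ hx)
      obtain ⟨items⟩ := d
      simp only [PySem.Dict.contains] at hxd ⊢
      simp [List.any_append, hxd, Ne.symm hxk]

-- run-length invariant of B's scan over a sorted tail: after flushing, every key reads its count
theorem rle_getD (s : List String) (d : PySem.Dict String Int) (p : String) (r : Int)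
    (hs : s.Pairwise (· ≤ ·)) (hp : ∀ y ∈ s, p ≤ y) (hd : ∀ k ∈ d.keys, k < p) (e : String) :
    PySem.Dict.getD (volcar (s.foldl pasoConteo (d, some p, r))) e 0
      = if e = p then r + (s.count p : Int)
        else if e ∈ s then (s.count e : Int) else PySem.Dict.getD d e 0 := by
  induction s generalizing d p r with
  | nil =>
    simp only [List.foldl_nil, volcar, List.count_nil, List.not_mem_nil]
    by_cases he : e = p
    · subst he; simp [PySem.Dict.getD_insert_self]
    · simp [he, PySem.Dict.getD_insert_of_ne _ _ _ he]
  | cons x t ih =>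
    simp only [List.foldl_cons]
    by_cases hx : x = p
    · subst hx
      have hstep : pasoConteo (d, some x, r) x = (d, some x, r + 1) := by
        simp [pasoConteo]
      rw [hstep, ih d x (r + 1) hs.of_cons
        (fun y hy => (List.pairwise_cons.mp hs).1 y hy) hd]
      by_cases he : e = x
      · subst he; simp [List.count_cons_self]; omega
      · simp [he, List.mem_cons, Ne.symm he]
    · have hpx : p < x := lt_of_le_of_ne (hp x (List.mem_cons_self)) (Ne.symm hx)
      have hstep : pasoConteo (d, some p, r) x = (PySem.Dict.insert d p r, some x, 1) := by
        simp [pasoConteo, hx]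
      have htgt : ∀ y ∈ t, x ≤ y := fun y hy => (List.pairwise_cons.mp hs).1 y hy
      have htp : ∀ y ∈ t, p < y := fun y hy => lt_of_lt_of_le hpx (htgt y hy)
      have hd' : ∀ k ∈ (PySem.Dict.insert d p r).keys, k < x := by
        intro k hk
        rcases (PySem.Dict.mem_keys_insert d p k r).mp hk with h1 | h1
        · exact h1 ▸ hpx
        · exact lt_trans (hd k h1) hpx
      rw [hstep, ih (PySem.Dict.insert d p r) x 1 hs.of_cons htgt hd']
      by_cases he : e = p
      · subst he
        have hent : e ∉ t := fun hm => lt_irrefl e (htp e hm)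
        have hext : e ∉ (x :: t) := by
          intro hm
          rcases List.mem_cons.mp hm with h | h
          · exact hx h.symm
          · exact hent h
        simp [ne_of_lt hpx, hent, List.count_eq_zero.mpr hext,
          PySem.Dict.getD_insert_self]
      · by_cases hex : e = x
        · subst hex
          simp [he, List.count_cons_self]
          omega
        · by_cases het : e ∈ t
          · simp [he, hex, het, Ne.symm hex]
          · have : e ∉ (x :: t) := by simp [hex, het]
            simp [he, hex, het, this, PySem.Dict.getD_insert_of_ne _ _ _ he]

-- B's cuentas dict maps every stripped line of a sorted list to its count
theorem cuentas_getD (s : List String) (hs : s.Pairwise (· ≤ ·)) (e : String) (he : e ∈ s) :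
    PySem.Dict.getD (volcar (s.foldl pasoConteo (PySem.Dict.empty, none, 0))) e 0
      = (s.count e : Int) := by
  cases s with
  | nil => cases he
  | cons x t =>
    have hstep : pasoConteo (PySem.Dict.empty, none, 0) x = (PySem.Dict.empty, some x, 1) := by
      simp [pasoConteo]
    rw [List.foldl_cons, hstep,
      rle_getD t PySem.Dict.empty x 1 hs.of_cons
        (fun y hy => (List.pairwise_cons.mp hs).1 y hy)
        (by intro k hk; cases hk) e]
    by_cases hex : e = x
    · subst hex; simp [List.count_cons_self]; omega
    · have het : e ∈ t := by
        rcases List.mem_cons.mp he with h | h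
        · exact absurd h hex
        · exact h
      simp [hex, het, Ne.symm hex]

-- ===== VERDICT (by name: the statement is the Claim_ definition above) =====
theorem contar_errores_spec : Claim_equal_contar_errores := by
  intro xs _
  show contar_errores xs = contar_errores_alt xs
  unfold contar_errores contar_errores_alt
  dsimp only
  rw [fold_eq_counter, ← PySem.Dict.counter_eq_foldl, PySem.Dict.items_counter]
  rw [fold_insert_items _ _ _ (PySem.List.nodup_dedup _)
    (by intro k _; simp [PySem.Dict.contains, PySem.Dict.empty])]
  simp only [PySem.List.dedup_eq_ofList]
  apply List.map_congr_left
  intro e he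
  have he' : e ∈ xs.map PySem.Str.strip := (PySem.Set.mem_ofList _ _).mp he
  have hes : e ∈ PySem.List.sorted (xs.map PySem.Str.strip) (fun x => x) false :=
    (PySem.List.mem_sorted _ _ _ _).mpr he'
  have hcount := cuentas_getD (PySem.List.sorted (xs.map PySem.Str.strip) (fun x => x) false)
    (PySem.List.sorted_pairwise _ _) e hes
  have hgetD : PySem.Dict.getD (volcar
      ((PySem.List.sorted (xs.map PySem.Str.strip) (fun x => x) false).foldl pasoConteo
        (PySem.Dict.empty, none, 0))) e 0
      = (PySem.Dict.get? (volcar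
      ((PySem.List.sorted (xs.map PySem.Str.strip) (fun x => x) false).foldl pasoConteo
        (PySem.Dict.empty, none, 0))) e).getD 0 := rfl
  rw [← hgetD, hcount, ((PySem.List.sorted_perm (xs.map PySem.Str.strip) (fun x => x) false).count_eq e)]
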